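-- pv_equiv track=rewrite | github.com/DevinDJdj/mrrubato | analyze/mymidi.py | getSigns
-- ===== SOURCE A (Python) =====
-- def getSigns(words):
--   bits = 0
--   for w in words:
--     tmp = 0
--     if w > 0:
--       tmp = 1
--     bits = bits << 1
--     bits |= tmp
--   return bits
-- ===== SOURCE B (Python) =====
-- def getSigns(words):
--   s = ''.join('1' if w > 0 else '0' for w in words)
--   return int(s, 2) if s else 0
-- ===== Notes on version B (the rewrite author's own statement) =====
-- stated objective: faster
-- what changed: Replaces the per-element shift-and-OR on a growing Python integer with building a '0'/'1' string in one comprehension and parsing it once with int(s, 2) (empty string guarded to 0).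
import Mathlib
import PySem

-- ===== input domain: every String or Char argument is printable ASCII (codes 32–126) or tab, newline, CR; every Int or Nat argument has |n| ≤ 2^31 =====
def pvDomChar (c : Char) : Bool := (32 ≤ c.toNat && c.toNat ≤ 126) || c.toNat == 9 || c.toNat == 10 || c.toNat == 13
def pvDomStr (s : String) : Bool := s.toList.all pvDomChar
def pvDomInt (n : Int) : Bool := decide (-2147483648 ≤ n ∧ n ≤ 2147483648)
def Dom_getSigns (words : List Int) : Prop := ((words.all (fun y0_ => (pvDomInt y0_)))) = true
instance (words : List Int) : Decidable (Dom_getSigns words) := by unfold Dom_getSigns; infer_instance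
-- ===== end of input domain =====

-- B builds the '0'/'1' digit sequence first and parses it once in base 2 (idiomatic), instead of A's per-element shift-and-OR accumulator; same values everywhere.

-- ===== PORT A =====
-- bits = 0; for w in words: tmp = 1 if w>0 else 0; bits = bits << 1; bits |= tmp
-- Python's `|` on int is Int.lor (exact here; no infix `|||` on Int in this toolchain).
def getSigns (words : List Int) : Int :=
  words.foldl (fun bits w =>
    let tmp : Int := if w > 0 then 1 else 0
    Int.lor (bits <<< (1:Nat)) tmp) 0

-- ===== PORT B =====
-- s = ''.join('1' if w > 0 else '0' for w in words); return int(s, 2) if s else 0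
-- int(s, 2) on a string of '0'/'1' digits is the left fold acc*2 + digit (exact on this digit-only string).
def getSigns_alt (words : List Int) : Int :=
  let s : List Char := words.map (fun w => if w > 0 then '1' else '0')
  if s.isEmpty then 0
  else s.foldl (fun acc c => acc * 2 + (if c = '1' then 1 else 0)) 0

-- ===== PRECONDITION & SPEC =====
def Spec_getSigns (words : List Int) (out : Int) : Prop := out = getSigns_alt words
instance (words : List Int) (out : Int) : Decidable (Spec_getSigns words out) := by unfold Spec_getSigns; infer_instance

-- ===== CLAIM =====
def Claim_equal_getSigns : Prop := ∀ (words : List Int), Dom_getSigns words → Spec_getSigns words (getSigns words)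

-- ===== LEMMAS AND PROOFS =====
theorem pv_shift_lor_one (m : Nat) : Int.lor ((m:Int) <<< (1:Nat)) 1 = ((2*m+1 : Nat) : Int) := by
  have h1 : ((m:Int) <<< (1:Nat)) = ((2*m : Nat) : Int) := by simp [Int.shiftLeft_eq]; ring
  have h2 : (2*m) ||| 1 = 2*m+1 := by simpa [Nat.bit] using Nat.lor_bit false m true 0
  rw [h1, show (1:Int) = ((1:Nat):Int) from rfl]
  simp [Int.lor, h2]

theorem pv_shift_lor_zero (m : Nat) : Int.lor ((m:Int) <<< (1:Nat)) 0 = ((2*m : Nat) : Int) := by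
  have h1 : ((m:Int) <<< (1:Nat)) = ((2*m : Nat) : Int) := by simp [Int.shiftLeft_eq]; ring
  rw [h1, show (0:Int) = ((0:Nat):Int) from rfl]
  simp [Int.lor]

theorem pv_fold_agree (ws : List Int) (m : Nat) :
    ws.foldl (fun bits w =>
      let tmp : Int := if w > 0 then 1 else 0
      Int.lor (bits <<< (1:Nat)) tmp) (m : Int)
    = (ws.map (fun w => if w > 0 then '1' else '0')).foldl
        (fun acc c => acc * 2 + (if c = '1' then 1 else 0)) (m : Int) := by
  induction ws generalizing m with
  | nil => simp
  | cons w ws ih =>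
    by_cases h : w > 0
    · simp only [List.foldl_cons, List.map_cons, h, if_pos]
      rw [show (Int.lor ((m:Int) <<< (1:Nat)) 1) = ((2*m+1 : Nat) : Int) from pv_shift_lor_one m,
          ih (2*m+1)]
      congr 1
      push_cast; simp; ring
    · simp only [List.foldl_cons, List.map_cons, h, if_false]
      rw [show (Int.lor ((m:Int) <<< (1:Nat)) 0) = ((2*m : Nat) : Int) from pv_shift_lor_zero m,
          ih (2*m)]
      congr 1
      push_cast; simp; ring

-- ===== VERDICT =====
theorem getSigns_spec : Claim_equal_getSigns := by
  intro words _
  unfold Spec_getSigns getSigns getSigns_alt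
  cases words with
  | nil => simp
  | cons w ws =>
    simp only [List.map_cons, List.isEmpty_cons, if_neg (by simp : ¬(false = true))]
    simpa using pv_fold_agree (w :: ws) 0
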